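-- pv_equiv track=rewrite | github.com/Alex16111977/comic-website | scripts/enrich_vocabulary.py | guess_participle
-- ===== SOURCE A (Python) =====
-- SEPARABLE_PREFIXES = [
--     'ab', 'an', 'auf', 'aus', 'bei', 'dar', 'ein', 'fest', 'her', 'hin', 'mit',
--     'nach', 'vor', 'weg', 'wieder', 'zu', 'zurück', 'zusammen', 'über'
-- ]
--
-- INSEPARABLE_PREFIXES = ['be', 'ge', 'er', 'ver', 'zer', 'ent', 'emp', 'miss', 'hinter']
--
-- def split_reflexive(word):
--     if word.startswith('sich '):
--         return 'sich', word[5:]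
--     return None, word
--
-- def stem_verb(base):
--     if base.endswith('eln'):
--         return base[:-3] + 'el'
--     if base.endswith('ern'):
--         return base[:-1]
--     if base.endswith('en'):
--         return base[:-2]
--     if base.endswith('n'):
--         return base[:-1]
--     return base
--
-- def guess_participle(word):
--     reflexive, base = split_reflexive(word)
--     participle = base
--     for pref in SEPARABLE_PREFIXES:
--         if base.startswith(pref) and len(base) > len(pref) + 2:
--             stem = base[len(pref):]
--             core = stem_verb(stem)
--             participle = f"{pref}ge{core}t"
--             break
--     else:
--         for pref in INSEPARABLE_PREFIXES:
--             if base.startswith(pref) and len(base) > len(pref) + 2: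
--                 stem = base[len(pref):]
--                 core = stem_verb(stem)
--                 participle = f"{pref}{core}t"
--                 break
--         else:
--             if base.endswith('ieren'):
--                 participle = base[:-3] + 'rt'
--             else:
--                 core = stem_verb(base)
--                 participle = f"ge{core}t"
--     if reflexive:
--         return f"hat sich {participle}"
--     return f"hat {participle}"
-- ===== SOURCE B (Python) =====
-- # B scans the word's own prefixes base[:k] for k = 1,2,... against prefix SETS
-- # (shortest match wins, which equals A's list order), with a restructured
-- # drop-the-ending stemmer; simpler single loop instead of two nested for/else.
--
-- SEPARABLE_PREFIXES = frozenset([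
--     'ab', 'an', 'auf', 'aus', 'bei', 'dar', 'ein', 'fest', 'her', 'hin', 'mit',
--     'nach', 'vor', 'weg', 'wieder', 'zu', 'zurück', 'zusammen', 'über'
-- ])
--
-- INSEPARABLE_PREFIXES = frozenset(
--     ['be', 'ge', 'er', 'ver', 'zer', 'ent', 'emp', 'miss', 'hinter'])
--
--
-- MAX_PREFIX_LEN = 8  # length of the longest entry in either prefix set
--
--
-- def stem_verb(base):
--     # Drop a final letter n; then drop a now-final letter e unless the stem
--     # now ends in el or er (covers all four suffix rules of the original).
--     if base.endswith('n'):
--         base = base[:-1]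
--         if base.endswith('e') and not (base.endswith('el') or base.endswith('er')):
--             base = base[:-1]
--     return base
--
--
-- def guess_participle(word):
--     reflexive = word.startswith('sich ')
--     base = word[5:] if reflexive else word
--     sep_hit = None
--     insep_hit = None
--     for k in range(1, min(len(base) - 2, MAX_PREFIX_LEN + 1)):
--         p = base[:k]
--         if sep_hit is None and p in SEPARABLE_PREFIXES:
--             sep_hit = p
--         if insep_hit is None and p in INSEPARABLE_PREFIXES:
--             insep_hit = p
--     if sep_hit is not None:
--         participle = sep_hit + 'ge' + stem_verb(base[len(sep_hit):]) + 't'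
--     elif insep_hit is not None:
--         participle = insep_hit + stem_verb(base[len(insep_hit):]) + 't'
--     elif base.endswith('ieren'):
--         participle = base[:-3] + 'rt'
--     else:
--         participle = 'ge' + stem_verb(base) + 't'
--     return ('hat sich ' if reflexive else 'hat ') + participle
-- ===== Notes on version B (the rewrite author's own statement) =====
-- stated objective: alternative
-- what changed: Instead of scanning the two prefix lists with a nested for/else, B enumerates the word's own prefixes base[:k] for k = 1..min(len(base)-3, max prefix length) in one pass, testing each against two prefix sets (shortest hit wins, which coincides with A's list-order priority since every nested prefix pair in the lists is listed shortest-first), and replaces the four-way suffix if-chain by a restructured stemmer that drops a final n and then conditionally one more letter.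
import Mathlib
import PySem

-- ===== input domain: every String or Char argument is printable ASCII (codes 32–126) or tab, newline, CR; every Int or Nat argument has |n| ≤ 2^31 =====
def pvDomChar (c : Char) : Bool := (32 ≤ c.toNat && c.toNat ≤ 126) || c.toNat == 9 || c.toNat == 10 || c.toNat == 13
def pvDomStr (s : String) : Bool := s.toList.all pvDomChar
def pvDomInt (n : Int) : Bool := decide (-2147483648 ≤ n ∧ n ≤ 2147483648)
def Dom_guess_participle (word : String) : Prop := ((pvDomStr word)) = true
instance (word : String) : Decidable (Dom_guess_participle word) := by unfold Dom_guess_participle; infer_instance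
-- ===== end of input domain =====

-- B replaces A's nested for/else scans of the two prefix lists by one pass over the
-- word's own prefixes base[:k] tested against prefix sets (shortest hit first), with a
-- restructured stemmer; same cost, alternative algorithm.

-- ===== PORT A =====
def sepPrefixes : List (List Char) :=
  ["ab".toList, "an".toList, "auf".toList, "aus".toList, "bei".toList, "dar".toList,
   "ein".toList, "fest".toList, "her".toList, "hin".toList, "mit".toList,
   "nach".toList, "vor".toList, "weg".toList, "wieder".toList, "zu".toList,
   "zurück".toList, "zusammen".toList, "über".toList]

def insepPrefixes : List (List Char) :=
  ["be".toList, "ge".toList, "er".toList, "ver".toList, "zer".toList,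
   "ent".toList, "emp".toList, "miss".toList, "hinter".toList]

def splitReflexive (word : List Char) : Option (List Char) × List Char :=
  if PySem.Chars.startswith word "sich ".toList then
    (some "sich".toList, PySem.Chars.slice word (some 5) none)
  else (none, word)

def stemVerb (base : List Char) : List Char :=
  if PySem.Chars.endswith base "eln".toList then
    PySem.Chars.slice base none (some (-3)) ++ "el".toList
  else if PySem.Chars.endswith base "ern".toList then
    PySem.Chars.slice base none (some (-1))
  else if PySem.Chars.endswith base "en".toList then
    PySem.Chars.slice base none (some (-2))
  else if PySem.Chars.endswith base "n".toList then
    PySem.Chars.slice base none (some (-1))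
  else base

-- A's inner for/else over INSEPARABLE_PREFIXES (the else-clause is the base case)
def loopInsep (ps : List (List Char)) (base : List Char) : List Char :=
  match ps with
  | [] =>
      if PySem.Chars.endswith base "ieren".toList then
        PySem.Chars.slice base none (some (-3)) ++ "rt".toList
      else "ge".toList ++ stemVerb base ++ "t".toList
  | p :: rest =>
      if PySem.Chars.startswith base p && decide (base.length > p.length + 2) then
        p ++ stemVerb (PySem.Chars.slice base (some (p.length : Int)) none) ++ "t".toList
      else loopInsep rest base

-- A's outer for/else over SEPARABLE_PREFIXES
def loopSep (ps : List (List Char)) (base : List Char) : List Char :=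
  match ps with
  | [] => loopInsep insepPrefixes base
  | p :: rest =>
      if PySem.Chars.startswith base p && decide (base.length > p.length + 2) then
        p ++ "ge".toList ++ stemVerb (PySem.Chars.slice base (some (p.length : Int)) none) ++ "t".toList
      else loopSep rest base

def guess_participle (word : String) : String :=
  let rb := splitReflexive word.toList
  let participle := loopSep sepPrefixes rb.2
  match rb.1 with
  | some _ => String.ofList ("hat sich ".toList ++ participle)
  | none => String.ofList ("hat ".toList ++ participle)

-- ===== PORT B =====
def sepSet : PySem.Set (List Char) := PySem.Set.ofList sepPrefixes

def insepSet : PySem.Set (List Char) := PySem.Set.ofList insepPrefixes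

-- Source B's stem_verb: drop a final 'n', then a now-final 'e' unless after an el/er stem
def stemVerbB (base : List Char) : List Char :=
  if PySem.Chars.endswith base "n".toList then
    let b1 := PySem.Chars.slice base none (some (-1))
    if PySem.Chars.endswith b1 "e".toList &&
        !(PySem.Chars.endswith b1 "el".toList || PySem.Chars.endswith b1 "er".toList) then
      PySem.Chars.slice b1 none (some (-1))
    else b1
  else base

def maxPrefixLen : Int := 8

-- Source B's loop: for k in range(1, min(len(base)-2, MAX_PREFIX_LEN+1)), remembering
-- the first hit in each set
def scanPrefixes (base : List Char) : Option (List Char) × Option (List Char) :=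
  (PySem.List.pyRange 1 (min ((base.length : Int) - 2) (maxPrefixLen + 1)) 1).foldl
    (fun s k =>
      ((if s.1.isNone && PySem.Set.contains sepSet (PySem.Chars.slice base none (some k)) then
          some (PySem.Chars.slice base none (some k)) else s.1),
       (if s.2.isNone && PySem.Set.contains insepSet (PySem.Chars.slice base none (some k)) then
          some (PySem.Chars.slice base none (some k)) else s.2)))
    (none, none)

def participleAlt (base : List Char) : List Char :=
  let hits := scanPrefixes base
  match hits.1 with
  | some p =>
      p ++ "ge".toList ++ stemVerbB (PySem.Chars.slice base (some (p.length : Int)) none) ++ "t".toList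
  | none =>
    match hits.2 with
    | some p =>
        p ++ stemVerbB (PySem.Chars.slice base (some (p.length : Int)) none) ++ "t".toList
    | none =>
        if PySem.Chars.endswith base "ieren".toList then
          PySem.Chars.slice base none (some (-3)) ++ "rt".toList
        else "ge".toList ++ stemVerbB base ++ "t".toList

def guess_participle_alt (word : String) : String :=
  if PySem.Chars.startswith word.toList "sich ".toList then
    String.ofList ("hat sich ".toList ++ participleAlt (PySem.Chars.slice word.toList (some 5) none))
  else
    String.ofList ("hat ".toList ++ participleAlt word.toList)

-- ===== PRECONDITION & SPEC =====
def Spec_guess_participle (word : String) (out : String) : Prop := out = guess_participle_alt word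
instance (word : String) (out : String) : Decidable (Spec_guess_participle word out) := by unfold Spec_guess_participle; infer_instance

-- ===== CLAIM (what is proved, stated in full; the proofs are below) =====
def Claim_equal_guess_participle : Prop := ∀ (word : String), Dom_guess_participle word → Spec_guess_participle word (guess_participle word)

-- ===== LEMMAS AND PROOFS =====

-- A's per-prefix guard, named for the proofs
def pvMatch (base p : List Char) : Bool :=
  PySem.Chars.startswith base p && decide (base.length > p.length + 2)


theorem endswith_concat (t s : List Char) (c d : Char) :
    PySem.Chars.endswith (t ++ [d]) (s ++ [c]) = ((c == d) && PySem.Chars.endswith t s) := by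
  rw [Bool.eq_iff_iff]
  simp only [Bool.and_eq_true, beq_iff_eq, PySem.Chars.endswith_iff]
  constructor
  · rintro ⟨w, hw⟩
    have hw' : (w ++ s) ++ [c] = t ++ [d] := by rw [List.append_assoc]; exact hw
    rcases List.append_inj' hw' rfl with ⟨h1, h2⟩
    exact ⟨by simpa using h2, ⟨w, h1⟩⟩
  · rintro ⟨rfl, w, rfl⟩
    exact ⟨w, by simp⟩

theorem endswith_suffix_false (b s t : List Char)
    (h : PySem.Chars.endswith b t = false) (hst : t <:+ s) :
    PySem.Chars.endswith b s = false := by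
  rw [Bool.eq_false_iff] at h ⊢
  intro hs
  exact h ((PySem.Chars.endswith_iff b t).mpr (hst.trans ((PySem.Chars.endswith_iff b s).mp hs)))

theorem endswith_eq_decide (b s : List Char) :
    PySem.Chars.endswith b s = decide (s.reverse <+: b.reverse) := by
  rw [Bool.eq_iff_iff]
  simp [PySem.Chars.endswith_iff, List.reverse_prefix]

theorem stemVerbB_eq (base : List Char) : stemVerbB base = stemVerb base := by
  by_cases hn : PySem.Chars.endswith base "n".toList = true
  · obtain ⟨y, rfl⟩ : ∃ y, base = y ++ ['n'] := by
      rcases (PySem.Chars.endswith_iff base "n".toList).mp hn with ⟨w, hw⟩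
      exact ⟨w, hw.symm⟩
    by_cases he : PySem.Chars.endswith y "e".toList = true
    · obtain ⟨z, rfl⟩ : ∃ z, y = z ++ ['e'] := by
        rcases (PySem.Chars.endswith_iff y "e".toList).mp he with ⟨w, hw⟩
        exact ⟨w, hw.symm⟩
      have t1 : PySem.Chars.endswith ((z ++ ['e']) ++ ['n']) "eln".toList = false := by
        simp [endswith_eq_decide, List.cons_prefix_cons]
      have t2 : PySem.Chars.endswith ((z ++ ['e']) ++ ['n']) "ern".toList = false := by
        simp [endswith_eq_decide, List.cons_prefix_cons]
      have t3 : PySem.Chars.endswith ((z ++ ['e']) ++ ['n']) "en".toList = true := by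
        simp [endswith_eq_decide, List.cons_prefix_cons]
      have t4 : PySem.Chars.endswith (z ++ ['e']) "el".toList = false := by
        simp [endswith_eq_decide, List.cons_prefix_cons]
      have t5 : PySem.Chars.endswith (z ++ ['e']) "er".toList = false := by
        simp [endswith_eq_decide, List.cons_prefix_cons]
      have t6 : PySem.Chars.endswith (z ++ ['e']) "e".toList = true := by
        simp [endswith_eq_decide, List.cons_prefix_cons]
      rw [stemVerbB, stemVerb]
      simp only [hn, t1, t2, t3, if_true, if_false, Bool.false_eq_true]
      have s1 : PySem.Chars.slice ((z ++ ['e']) ++ ['n']) none (some (-1)) = z ++ ['e'] := by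
        simp [PySem.List.slice_to_neg_one]
      rw [s1]
      simp only [t4, t5, t6, Bool.or_self, Bool.not_false, Bool.and_true, if_true]
      have s2 : PySem.Chars.slice ((z ++ ['e']) ++ ['n']) none (some (-2)) = z := by
        simp [PySem.List.slice]
      have s3 : PySem.Chars.slice (z ++ ['e']) none (some (-1)) = z := by
        simp [PySem.List.slice_to_neg_one]
      rw [s2, s3]
    · by_cases hel : PySem.Chars.endswith y "el".toList = true
      · obtain ⟨w, rfl⟩ : ∃ w, y = (w ++ ['e']) ++ ['l'] := by
          rcases (PySem.Chars.endswith_iff y "el".toList).mp hel with ⟨v, hv⟩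
          exact ⟨v, by rw [← hv]; simp⟩
        have t1 : PySem.Chars.endswith (((w ++ ['e']) ++ ['l']) ++ ['n']) "eln".toList = true := by
          simp [endswith_eq_decide, List.cons_prefix_cons]
        rw [stemVerbB, stemVerb]
        simp only [hn, t1, if_true]
        have s1 : PySem.Chars.slice (((w ++ ['e']) ++ ['l']) ++ ['n']) none (some (-1)) = (w ++ ['e']) ++ ['l'] := by
          simp [PySem.List.slice_to_neg_one]
        rw [s1]
        have t4 : PySem.Chars.endswith ((w ++ ['e']) ++ ['l']) "e".toList = false := by
          simp [endswith_eq_decide, List.cons_prefix_cons]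
        simp only [t4, Bool.false_and, if_false, Bool.false_eq_true]
        have s2 : PySem.Chars.slice (((w ++ ['e']) ++ ['l']) ++ ['n']) none (some (-3)) = w := by
          simp [PySem.List.slice]
        rw [s2]
        simp
      · by_cases her : PySem.Chars.endswith y "er".toList = true
        · obtain ⟨w, rfl⟩ : ∃ w, y = (w ++ ['e']) ++ ['r'] := by
            rcases (PySem.Chars.endswith_iff y "er".toList).mp her with ⟨v, hv⟩
            exact ⟨v, by rw [← hv]; simp⟩
          have t1 : PySem.Chars.endswith (((w ++ ['e']) ++ ['r']) ++ ['n']) "eln".toList = false := by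
            simp [endswith_eq_decide, List.cons_prefix_cons]
          have t2 : PySem.Chars.endswith (((w ++ ['e']) ++ ['r']) ++ ['n']) "ern".toList = true := by
            simp [endswith_eq_decide, List.cons_prefix_cons]
          have t4 : PySem.Chars.endswith ((w ++ ['e']) ++ ['r']) "e".toList = false := by
            simp [endswith_eq_decide, List.cons_prefix_cons]
          rw [stemVerbB, stemVerb]
          simp only [hn, t1, t2, if_true, if_false, Bool.false_eq_true]
          have s1 : PySem.Chars.slice (((w ++ ['e']) ++ ['r']) ++ ['n']) none (some (-1)) = (w ++ ['e']) ++ ['r'] := by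
            simp [PySem.List.slice_to_neg_one]
          rw [s1]
          simp only [t4, Bool.false_and, if_false, Bool.false_eq_true]
        · -- y ends neither 'el', 'er' nor 'e'
          have heln : PySem.Chars.endswith (y ++ ['n']) "eln".toList = false := by
            rw [show ("eln".toList : List Char) = "el".toList ++ ['n'] from by decide,
              endswith_concat, Bool.eq_false_iff.mpr hel]
            simp
          have hern : PySem.Chars.endswith (y ++ ['n']) "ern".toList = false := by
            rw [show ("ern".toList : List Char) = "er".toList ++ ['n'] from by decide,
              endswith_concat, Bool.eq_false_iff.mpr her]
            simp
          have hen : PySem.Chars.endswith (y ++ ['n']) "en".toList = false := by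
            rw [show ("en".toList : List Char) = "e".toList ++ ['n'] from by decide,
              endswith_concat, Bool.eq_false_iff.mpr he]
            simp
          rw [stemVerbB, stemVerb]
          simp only [hn, heln, hern, hen, if_true, if_false, Bool.false_eq_true]
          have s1 : PySem.Chars.slice (y ++ ['n']) none (some (-1)) = y := by
            simp [PySem.List.slice_to_neg_one]
          rw [s1]
          simp only [Bool.eq_false_iff.mpr he, Bool.false_and, if_false, Bool.false_eq_true]
  · have hf : PySem.Chars.endswith base "n".toList = false := Bool.eq_false_iff.mpr hn
    have h1 := endswith_suffix_false base "eln".toList "n".toList hf (by decide)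
    have h2 := endswith_suffix_false base "ern".toList "n".toList hf (by decide)
    have h3 := endswith_suffix_false base "en".toList "n".toList hf (by decide)
    rw [stemVerbB, stemVerb]
    simp only [hf, h1, h2, h3, if_false, Bool.false_eq_true]

theorem foldl_first_hit (c : Int → Bool) (f : Int → List Char) (ks : List Int) (s0 : Option (List Char)) :
    ks.foldl (fun s k => if s.isNone && c k then some (f k) else s) s0 =
      match s0 with
      | some v => some v
      | none => (ks.find? c).map f := by
  induction ks generalizing s0 with
  | nil => cases s0 <;> simp
  | cons k rest ih =>
    rw [List.foldl_cons]
    cases s0 with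
    | some v =>
      have h1 : (if (some v : Option (List Char)).isNone && c k then some (f k) else some v) = some v := by
        simp
      rw [h1, ih]
    | none =>
      by_cases hc : c k = true
      · have h1 : (if (none : Option (List Char)).isNone && c k then some (f k) else none) = some (f k) := by
          simp [hc]
        rw [h1, ih, List.find?_cons_of_pos (p := c) hc]
        rfl
      · have h1 : (if (none : Option (List Char)).isNone && c k then some (f k) else none) = none := by
          simp [hc]
        rw [h1, ih, List.find?_cons_of_neg (p := c) (by simpa using hc)]

theorem find?_min_length (ps : List (List Char)) (base p : List Char)
    (hord : ps.Pairwise (fun a b => ¬ b <+: a))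
    (hfind : ps.find? (pvMatch base) = some p) :
    ∀ q ∈ ps, pvMatch base q = true → p.length ≤ q.length := by
  induction ps with
  | nil => simp at hfind
  | cons a rest ih =>
    rcases List.pairwise_cons.mp hord with ⟨hha, hrest⟩
    by_cases ha : pvMatch base a = true
    · rw [List.find?_cons_of_pos (p := pvMatch base) ha] at hfind
      have hap : a = p := by injection hfind
      intro q hq hmq
      rcases List.mem_cons.mp hq with rfl | hq'
      · exact le_of_eq (congrArg List.length hap.symm)
      · by_contra hlt
        push Not at hlt
        have hqpre : q <+: base := (PySem.Chars.startswith_iff base q).mp (by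
          simp [pvMatch] at hmq; exact hmq.1)
        have hppre : p <+: base := (PySem.Chars.startswith_iff base p).mp (by
          rw [hap] at ha; simp [pvMatch] at ha; exact ha.1)
        have hqp := List.prefix_of_prefix_length_le hqpre hppre (le_of_lt hlt)
        rw [← hap] at hqp
        exact hha q hq' hqp
    · rw [List.find?_cons_of_neg (p := pvMatch base) (by simpa using ha)] at hfind
      intro q hq hmq
      rcases List.mem_cons.mp hq with rfl | hq'
      · exact absurd hmq ha
      · exact ih hrest hfind q hq' hmq

theorem find?_eq_some_of_sorted (c : Int → Bool) (ks : List Int)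
    (hsort : ks.Pairwise (· < ·)) (v : Int) (hv : v ∈ ks) (hcv : c v = true)
    (hmin : ∀ k ∈ ks, k < v → c k = false) : ks.find? c = some v := by
  induction ks with
  | nil => simp at hv
  | cons k rest ih =>
    rcases List.pairwise_cons.mp hsort with ⟨hk, hrest⟩
    by_cases hck : c k = true
    · rw [List.find?_cons_of_pos (p := c) hck]
      rcases List.mem_cons.mp hv with rfl | hv'
      · rfl
      · exact absurd (hmin k List.mem_cons_self (hk v hv')) (by simp [hck])
    · rw [List.find?_cons_of_neg (p := c) (by simpa using hck)]
      rcases List.mem_cons.mp hv with rfl | hv'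
      · exact absurd hcv hck
      · exact ih hrest hv' (fun k' hk' h' => hmin k' (List.mem_cons_of_mem _ hk') h')

theorem contains_take (ps : List (List Char)) (base : List Char) (k : Int)
    (h1 : 1 ≤ k) (h2 : k < (base.length : Int) - 2)
    (hc : PySem.Set.contains (PySem.Set.ofList ps) (PySem.Chars.slice base none (some k)) = true) :
    base.take k.toNat ∈ ps ∧ pvMatch base (base.take k.toNat) = true := by
  have hsl : PySem.Chars.slice base none (some k) = base.take k.toNat := by
    simp only [PySem.Chars.slice_eq_listSlice]
    exact PySem.List.slice_to base (by omega)
  rw [hsl] at hc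
  have hmem : base.take k.toNat ∈ ps := by
    have : base.take k.toNat ∈ PySem.Set.ofList ps := by
      simpa [PySem.Set.contains] using hc
    simpa [PySem.Set.mem_ofList] using this
  refine ⟨hmem, ?_⟩
  have hklen : k.toNat + 2 < base.length := by omega
  have hlen : (base.take k.toNat).length = k.toNat := by
    simp; omega
  simp only [pvMatch, Bool.and_eq_true, decide_eq_true_eq, hlen]
  exact ⟨(PySem.Chars.startswith_iff base _).mpr (List.take_prefix _ _), by omega⟩

theorem find_len_eq_find_list (ps : List (List Char)) (base : List Char) (M : Int)
    (hord : ps.Pairwise (fun a b => ¬ b <+: a)) (hpos : ∀ p ∈ ps, p ≠ [])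
    (hmax : ∀ p ∈ ps, (p.length : Int) < M) :
    ((PySem.List.pyRange 1 (min ((base.length : Int) - 2) M) 1).find?
        (fun k => PySem.Set.contains (PySem.Set.ofList ps) (PySem.Chars.slice base none (some k)))).map
      (fun k => PySem.Chars.slice base none (some k))
      = ps.find? (pvMatch base) := by
  set c : Int → Bool :=
    fun k => PySem.Set.contains (PySem.Set.ofList ps) (PySem.Chars.slice base none (some k)) with hcdef
  cases hf : ps.find? (pvMatch base) with
  | none =>
    have hall := List.find?_eq_none.mp hf
    have : (PySem.List.pyRange 1 (min ((base.length : Int) - 2) M) 1).find? c = none := by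
      rw [List.find?_eq_none]
      intro k hk
      have hkr := (PySem.List.mem_pyRange_one).mp hk
      intro hck
      rcases contains_take ps base k hkr.1 (by omega) hck with ⟨hmem, hm⟩
      exact hall _ hmem hm
    rw [this]; rfl
  | some p =>
    have hm : pvMatch base p = true := List.find?_some hf
    have hp : p ∈ ps := List.mem_of_find?_eq_some hf
    have hppre : p <+: base := (PySem.Chars.startswith_iff base p).mp (by
      simp [pvMatch] at hm; exact hm.1)
    have hlen : p.length + 2 < base.length := by
      simp [pvMatch] at hm; omega
    have hppos : 0 < p.length := List.length_pos_iff.mpr (hpos p hp)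
    have hmin := find?_min_length ps base p hord hf
    have hpM := hmax p hp
    have hvmem : (p.length : Int) ∈ PySem.List.pyRange 1 (min ((base.length : Int) - 2) M) 1 := by
      rw [PySem.List.mem_pyRange_one]
      constructor <;> omega
    have hslicep : PySem.Chars.slice base none (some (p.length : Int)) = p := by
      have : PySem.Chars.slice base none (some (p.length : Int)) = base.take p.length := by
        simp only [PySem.Chars.slice_eq_listSlice]
        rw [PySem.List.slice_to base (by omega : (0:Int) ≤ (p.length : Int))]
        simp
      rw [this, ← List.prefix_iff_eq_take.mp hppre]
    have hcv : c (p.length : Int) = true := by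
      rw [hcdef]
      simp only [hslicep]
      simp [PySem.Set.contains, PySem.Set.mem_ofList, hp]
    have hfind := find?_eq_some_of_sorted c _
      (PySem.List.pairwise_lt_pyRange_one 1 (min ((base.length : Int) - 2) M))
      (p.length : Int) hvmem hcv ?_
    · rw [hfind]
      simp
      exact (List.prefix_iff_eq_take.mp hppre).symm
    · intro k hk hklt
      have hkr := (PySem.List.mem_pyRange_one).mp hk
      by_contra hck
      rw [Bool.not_eq_false] at hck
      rcases contains_take ps base k hkr.1 (by omega) hck with ⟨hmem, hmk⟩
      have := hmin _ hmem hmk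
      have hlen2 : (base.take k.toNat).length = k.toNat := by simp; omega
      omega

theorem loopInsep_eq_find (ps : List (List Char)) (base : List Char) :
    loopInsep ps base =
      match ps.find? (pvMatch base) with
      | some p => p ++ stemVerb (PySem.Chars.slice base (some (p.length : Int)) none) ++ "t".toList
      | none =>
          if PySem.Chars.endswith base "ieren".toList then
            PySem.Chars.slice base none (some (-3)) ++ "rt".toList
          else "ge".toList ++ stemVerb base ++ "t".toList := by
  induction ps with
  | nil => rfl
  | cons p rest ih =>
    by_cases h : pvMatch base p = true
    · rw [loopInsep, if_pos (by simpa [pvMatch] using h),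
        List.find?_cons_of_pos (p := pvMatch base) h]
    · rw [loopInsep, if_neg (by simpa [pvMatch] using h),
        List.find?_cons_of_neg (p := pvMatch base) (by simpa using h), ih]

theorem loopSep_eq_find (ps : List (List Char)) (base : List Char) :
    loopSep ps base =
      match ps.find? (pvMatch base) with
      | some p => p ++ "ge".toList ++ stemVerb (PySem.Chars.slice base (some (p.length : Int)) none) ++ "t".toList
      | none => loopInsep insepPrefixes base := by
  induction ps with
  | nil => rfl
  | cons p rest ih =>
    by_cases h : pvMatch base p = true
    · rw [loopSep, if_pos (by simpa [pvMatch] using h),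
        List.find?_cons_of_pos (p := pvMatch base) h]
    · rw [loopSep, if_neg (by simpa [pvMatch] using h),
        List.find?_cons_of_neg (p := pvMatch base) (by simpa using h), ih]

theorem scanPrefixes_eq (base : List Char) :
    scanPrefixes base =
      (sepPrefixes.find? (pvMatch base), insepPrefixes.find? (pvMatch base)) := by
  rw [scanPrefixes,
    PySem.List.foldl_prod_mk
      (f := fun (s1 : Option (List Char)) k =>
        if s1.isNone && PySem.Set.contains sepSet (PySem.Chars.slice base none (some k)) then
          some (PySem.Chars.slice base none (some k)) else s1)
      (g := fun (s2 : Option (List Char)) k =>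
        if s2.isNone && PySem.Set.contains insepSet (PySem.Chars.slice base none (some k)) then
          some (PySem.Chars.slice base none (some k)) else s2),
    foldl_first_hit, foldl_first_hit]
  rw [show sepSet = PySem.Set.ofList sepPrefixes from rfl,
    show insepSet = PySem.Set.ofList insepPrefixes from rfl]
  rw [find_len_eq_find_list sepPrefixes base (maxPrefixLen + 1) (by decide) (by decide) (by decide),
    find_len_eq_find_list insepPrefixes base (maxPrefixLen + 1) (by decide) (by decide) (by decide)]

theorem participleAlt_eq (base : List Char) : participleAlt base = loopSep sepPrefixes base := by
  rw [participleAlt, scanPrefixes_eq, loopSep_eq_find]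
  cases hs : sepPrefixes.find? (pvMatch base) with
  | some p => simp [stemVerbB_eq]
  | none =>
    rw [loopInsep_eq_find]
    cases hi : insepPrefixes.find? (pvMatch base) with
    | some p => simp [stemVerbB_eq]
    | none => simp [stemVerbB_eq]

-- ===== VERDICT (by name: the statement is the Claim_ definition above) =====
theorem guess_participle_spec : Claim_equal_guess_participle := by
  intro word _
  unfold Spec_guess_participle
  unfold guess_participle guess_participle_alt splitReflexive
  by_cases h : PySem.Chars.startswith word.toList ['s','i','c','h',' '] <;>
    simp [h, participleAlt_eq]
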